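-- pv_equiv track=rewrite | github.com/Ganeshbabu26/BabuPython | code/temp.py | sumExceptSelf
-- ===== SOURCE A (Python) =====
-- def sumExceptSelf(arr):
--     n = len(arr)
--     res = [0]*n
--     left = 0
--     right = 0
--     '''
--     res = [0,0,0,0]
--
--     res[i] = 0
--     left = 0 + 1
--
--     res = [0,0,0,0]
--
--     res[i] = 1
--     left = 1 + 2 = 3
--
--     res = [0,1,0,0]
--
--     i = 2
--     res[i] = 3
--     left = 3 + 3 = 6
--
--     res = [0,1,3,0]
--
--     res[i] = 6
--     left = 6 + 4 = 10
--
--     res = [0,1,3,6]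
--
--     res[3] = 6 + 0 = 6
--     right = 0 + 4 = 4
--     res = [0,1,3,6]
--
--     res[2] = 3 + 4 = 7
--     right = 4 + 3 = 7
--     res = [0,1,7,6]
--
--     res[1] = 1 + 7 = 8
--     right = 7 + 2 = 9
--     res = [0, 8,7,6]
--
--     res[0] = 0 + 9 = 9
--     right = 9 + 1 = 10
--     res = [9,8,7,6]
--
--     '''
--
--     for i in range(n):
--         res[i] = left
--         left += arr[i]
--
--     for i in range(n-1,-1,-1):
--         res[i] += right
--         right += arr[i]
--
--     return res
-- ===== SOURCE B (Python) =====
-- def sumExceptSelf(arr):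
--     total = sum(arr)
--     return [total - x for x in arr]
-- ===== Notes on version B (the rewrite author's own statement) =====
-- stated objective: simpler
-- what changed: Replaced the two directional running-sum passes over a preallocated result array by one grand total sum(arr) and a single comprehension [total - x for x in arr].
import Mathlib
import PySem

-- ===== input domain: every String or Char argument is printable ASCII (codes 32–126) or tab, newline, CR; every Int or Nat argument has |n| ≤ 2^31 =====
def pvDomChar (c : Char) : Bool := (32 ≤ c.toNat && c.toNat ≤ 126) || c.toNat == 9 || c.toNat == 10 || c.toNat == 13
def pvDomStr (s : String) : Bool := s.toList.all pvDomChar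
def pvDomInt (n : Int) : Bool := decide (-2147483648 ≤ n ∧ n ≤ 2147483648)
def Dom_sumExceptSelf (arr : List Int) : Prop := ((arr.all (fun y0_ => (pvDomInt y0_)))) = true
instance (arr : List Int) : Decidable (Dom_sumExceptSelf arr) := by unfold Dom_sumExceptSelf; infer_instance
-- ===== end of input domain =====

-- B replaces A's two directional running-sum passes by one total and one subtraction per element (simpler).

-- ===== PORT A =====
-- literal port of A: res = [0]*n; ascending pass writing the left running sum,
-- then descending pass adding the right running sum in place.
def sumExceptSelf (arr : List Int) : List Int :=
  let n : Int := (arr.length : Int)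
  let res : List Int := List.replicate arr.length (0 : Int)
  let s1 := (PySem.List.pyRange 0 n 1).foldl
    (fun (st : List Int × Int) i =>
      (st.1.set i.toNat st.2, st.2 + PySem.List.pyGetD arr i 0)) (res, 0)
  let s2 := (PySem.List.pyRange (n - 1) (-1) (-1)).foldl
    (fun (st : List Int × Int) i =>
      (st.1.set i.toNat (PySem.List.pyGetD st.1 i 0 + st.2), st.2 + PySem.List.pyGetD arr i 0)) (s1.1, 0)
  s2.1

-- ===== PORT B =====
def sumExceptSelf_alt (arr : List Int) : List Int :=
  let total := arr.sum
  arr.map (fun x => total - x)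

-- ===== PRECONDITION & SPEC =====
def Spec_sumExceptSelf (arr : List Int) (out : List Int) : Prop := out = sumExceptSelf_alt arr
instance (arr : List Int) (out : List Int) : Decidable (Spec_sumExceptSelf arr out) := by unfold Spec_sumExceptSelf; infer_instance

-- ===== CLAIM (what is proved, stated in full; the proofs are below) =====
def Claim_equal_sumExceptSelf : Prop := ∀ (arr : List Int), Dom_sumExceptSelf arr → Spec_sumExceptSelf arr (sumExceptSelf arr)

-- ===== LEMMAS AND PROOFS =====

-- prefix-sum list: pref arr k = [sum arr[0:t] for t in range(k)]
def pref (arr : List Int) (k : Nat) : List Int :=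
  (List.range k).map (fun t => (arr.take t).sum)

theorem pref_succ (arr : List Int) (k : Nat) :
    pref arr (k + 1) = pref arr k ++ [(arr.take k).sum] := by
  simp [pref, List.range_succ]

theorem set_append_cons (A : List Int) (x v : Int) (l : List Int) (n : Nat) (h : n = A.length) :
    (A ++ x :: l).set n v = A ++ v :: l := by subst h; simp

theorem pyGetD_append_cons (A : List Int) (x d : Int) (l : List Int) (n : Nat) (h : n = A.length) :
    PySem.List.pyGetD (A ++ x :: l) (n : Int) d = x := by
  subst h; simp [PySem.List.pyGetD_natCast]

theorem sum_take_succ (arr : List Int) (k : Nat) (hklt : k < arr.length) :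
    (arr.take (k + 1)).sum = (arr.take k).sum + arr[k] := by
  rw [List.take_succ_eq_append_getElem hklt, List.sum_append, List.sum_cons, List.sum_nil, add_zero]

-- invariant of A's first (ascending) loop
theorem loop1_inv (arr : List Int) : ∀ (cnt k : Nat), k + cnt = arr.length →
    ((PySem.List.pyRange (k : Int) (arr.length : Int) 1).foldl
      (fun (st : List Int × Int) i =>
        (st.1.set i.toNat st.2, st.2 + PySem.List.pyGetD arr i 0))
      (pref arr k ++ List.replicate cnt 0, (arr.take k).sum))
    = (pref arr arr.length, arr.sum) := by
  intro cnt
  induction cnt with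
  | zero =>
    intro k hk
    rw [PySem.List.pyRange_one_eq_nil (by omega)]
    simp [show k = arr.length by omega]
  | succ m ih =>
    intro k hk
    have hklt : k < arr.length := by omega
    rw [PySem.List.pyRange_one_cons (by exact_mod_cast hklt)]
    simp only [List.foldl_cons]
    have hlen : (pref arr k).length = k := by simp [pref]
    have hset : (pref arr k ++ List.replicate (m + 1) (0 : Int)).set ((k : Int)).toNat ((arr.take k).sum)
        = pref arr (k + 1) ++ List.replicate m 0 := by
      rw [List.replicate_succ, show ((k : Int)).toNat = k by omega,
          set_append_cons _ _ _ _ _ hlen.symm, pref_succ, List.append_assoc, List.singleton_append]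
    have hget : PySem.List.pyGetD arr (k : Int) 0 = arr[k] := by
      simp [PySem.List.pyGetD_natCast, List.getD_eq_getElem?_getD, List.getElem?_eq_getElem hklt]
    rw [hset, hget, ← sum_take_succ arr k hklt,
        show ((k : Int) + 1) = ((k + 1 : Nat) : Int) by push_cast; ring]
    exact ih (k + 1) (by omega)

-- invariant of A's second (descending) loop
theorem loop2_inv (arr : List Int) : ∀ (cnt : Nat), cnt ≤ arr.length →
    ∀ (suf : List Int) (right : Int),
    ((PySem.List.pyRange ((cnt : Int) - 1) (-1) (-1)).foldl
      (fun (st : List Int × Int) i =>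
        (st.1.set i.toNat (PySem.List.pyGetD st.1 i 0 + st.2), st.2 + PySem.List.pyGetD arr i 0))
      (pref arr cnt ++ suf, right))
    = ((List.range cnt).map
         (fun t => (arr.take t).sum + (right + ((arr.take cnt).drop (t + 1)).sum)) ++ suf,
       right + (arr.take cnt).sum) := by
  intro cnt
  induction cnt with
  | zero =>
    intro _ suf right
    rw [PySem.List.pyRange_neg_one_eq_nil (by omega)]
    simp [pref]
  | succ m ih =>
    intro hle suf right
    have hmlt : m < arr.length := by omega
    have hlen : (pref arr m).length = m := by simp [pref]
    rw [show ((m + 1 : Nat) : Int) - 1 = (m : Int) by push_cast; ring]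
    rw [PySem.List.pyRange_neg_one_cons (by omega)]
    simp only [List.foldl_cons]
    have hget : PySem.List.pyGetD (pref arr (m + 1) ++ suf) (m : Int) 0 = (arr.take m).sum := by
      rw [pref_succ, List.append_assoc, List.singleton_append, pyGetD_append_cons _ _ _ _ _ hlen.symm]
    have hset : (pref arr (m + 1) ++ suf).set ((m : Int)).toNat ((arr.take m).sum + right)
        = pref arr m ++ (((arr.take m).sum + right) :: suf) := by
      rw [pref_succ, List.append_assoc, List.singleton_append, show ((m : Int)).toNat = m by omega,
          set_append_cons _ _ _ _ _ hlen.symm]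
    have hgeta : PySem.List.pyGetD arr (m : Int) 0 = arr[m] := by
      simp [PySem.List.pyGetD_natCast, List.getD_eq_getElem?_getD, List.getElem?_eq_getElem hmlt]
    rw [hget, hset, hgeta, ih (by omega)]
    have htake : arr.take (m + 1) = arr.take m ++ [arr[m]] := List.take_succ_eq_append_getElem hmlt
    simp only [Prod.mk.injEq]
    constructor
    · rw [List.range_succ, List.map_append, List.append_assoc]
      congr 1
      · apply List.map_congr_left
        intro t ht
        have htm : t < m := List.mem_range.mp ht
        rw [htake, List.drop_append_of_le_length (by simp [List.length_take]; omega),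
            List.sum_append, List.sum_cons, List.sum_nil]
        ring
      · rw [List.map_singleton, List.drop_eq_nil_of_le (by simp [List.length_take]),
            List.sum_nil, add_zero, List.singleton_append]
    · rw [htake, List.sum_append, List.sum_cons, List.sum_nil]
      ring

-- pointwise value of A's result equals B's
theorem final_eq (arr : List Int) :
    (List.range arr.length).map
      (fun t => (arr.take t).sum + ((arr.take arr.length).drop (t + 1)).sum)
    = arr.map (fun x => arr.sum - x) := by
  apply List.ext_getElem
  · simp
  · intro i h1 h2
    simp only [List.getElem_map, List.getElem_range, List.take_length]
    have hi : i < arr.length := by simpa using h2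
    have hsplit : (arr.take i).sum + (arr.drop i).sum = arr.sum := List.sum_take_add_sum_drop arr i
    have hcons : arr[i] :: arr.drop (i + 1) = arr.drop i := List.getElem_cons_drop hi
    have h3 : (arr.drop i).sum = arr[i] + (arr.drop (i + 1)).sum := by
      rw [← hcons, List.sum_cons]
    omega

-- ===== VERDICT (by name: the statement is the Claim_ definition above) =====
theorem sumExceptSelf_spec : Claim_equal_sumExceptSelf := by
  intro arr _
  unfold Spec_sumExceptSelf sumExceptSelf sumExceptSelf_alt
  have h1 := loop1_inv arr arr.length 0 (by omega)
  simp only [pref, List.range_zero, List.map_nil, List.nil_append, List.take_zero,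
    List.sum_nil, Nat.cast_zero] at h1
  have h2 := loop2_inv arr arr.length (le_refl _) [] 0
  rw [List.append_nil] at h2
  simp only [pref] at h2
  simp only [h1, h2, List.append_nil, zero_add]
  exact final_eq arr
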